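-- pv_equiv track=rewrite | github.com/deepakkumar8400/DATAez | backend/question_generator.py | _parse_questions_manually
-- ===== SOURCE A (Python) =====
-- from typing import List, Dict, Tuple
--
-- def _parse_questions_manually(response_text: str, num_questions: int) -> List[Dict]:
--     """Manually parse questions if JSON parsing fails"""
--     questions = []
--     lines = response_text.split('\n')
--
--     current_question = {}
--     for line in lines:
--         line = line.strip()
--         if line.startswith(('1.', '2.', '3.', 'Question:', 'Q:')):
--             if current_question:
--                 questions.append(current_question)
--                 current_question = {}
--             current_question['question'] = line
--             current_question['expected_answer'] = "Based on document content"
--             current_question['difficulty'] = "Medium"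
--             current_question['type'] = "comprehension"
--
--     if current_question:
--         questions.append(current_question)
--
--     return questions[:num_questions]
-- ===== SOURCE B (Python) =====
-- from typing import List, Dict
--
-- def _parse_questions_manually(response_text: str, num_questions: int) -> List[Dict]:
--     """Scan the raw text for newline positions with str.find instead of
--     splitting into a list; emit a dict per matching line, then slice."""
--     prefixes = ('1.', '2.', '3.', 'Question:', 'Q:')
--     out = []
--     rest = response_text
--     while True:
--         j = rest.find('\n')
--         line = (rest if j == -1 else rest[:j]).strip()
--         if line.startswith(prefixes):
--             out.append({
--                 'question': line,
--                 'expected_answer': "Based on document content",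
--                 'difficulty': "Medium",
--                 'type': "comprehension",
--             })
--         if j == -1:
--             break
--         rest = rest[j + 1:]
--     return out[:num_questions]
-- ===== Notes on version B (the rewrite author's own statement) =====
-- stated objective: alternative
-- what changed: B never materialises a line list: instead of split('\n') plus a stateful current_question build-and-flush loop, it scans the raw string with str.find for the next newline, slices out each segment, appends a dict per matching segment, and slices the result.
import Mathlib
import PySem

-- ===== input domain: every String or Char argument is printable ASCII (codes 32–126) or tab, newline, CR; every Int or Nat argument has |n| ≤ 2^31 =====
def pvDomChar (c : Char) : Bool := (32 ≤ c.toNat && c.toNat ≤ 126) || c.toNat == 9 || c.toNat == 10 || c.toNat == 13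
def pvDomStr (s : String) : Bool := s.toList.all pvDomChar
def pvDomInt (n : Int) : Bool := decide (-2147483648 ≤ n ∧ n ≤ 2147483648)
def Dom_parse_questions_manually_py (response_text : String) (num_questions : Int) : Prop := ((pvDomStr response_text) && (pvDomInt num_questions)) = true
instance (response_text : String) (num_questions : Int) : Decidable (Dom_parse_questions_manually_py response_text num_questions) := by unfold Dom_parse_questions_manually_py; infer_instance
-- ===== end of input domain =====

-- B never splits the text into a line list: it scans the raw string with
-- str.find for newline positions and slicing, emitting one dict per matching
-- segment (objective: alternative). Return values are proved equal everywhere.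

-- ===== PORT A =====
-- loop body; state = (questions, current_question)
def pvStepA (st : List (List (String × String)) × PySem.Dict String String) (line : String) :
    List (List (String × String)) × PySem.Dict String String :=
  let l := PySem.Str.strip line
  if ["1.", "2.", "3.", "Question:", "Q:"].any (fun p => PySem.Str.startswith l p) then
    -- 'if current_question: questions.append(current_question); current_question = {}'
    let qs := if st.2.items ≠ [] then st.1 ++ [st.2.items] else st.1
    let cur := if st.2.items ≠ [] then PySem.Dict.empty else st.2
    -- the four key assignments
    (qs, PySem.Dict.insert (PySem.Dict.insert (PySem.Dict.insert (PySem.Dict.insert cur "question" l)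
      "expected_answer" "Based on document content") "difficulty" "Medium") "type" "comprehension")
  else st

def parse_questions_manually_py (response_text : String) (num_questions : Int) : List (List (String × String)) :=
  -- sep "\n" is nonempty, so split? always returns some
  let lines := (PySem.Str.split? response_text "\n").getD []
  let st := lines.foldl pvStepA ([], PySem.Dict.empty)
  let questions := if st.2.items ≠ [] then st.1 ++ [st.2.items] else st.1
  PySem.List.slice questions none (some num_questions)

-- ===== PORT B =====
def pvMatchC (l : List Char) : Bool :=
  ["1.".toList, "2.".toList, "3.".toList, "Question:".toList, "Q:".toList].any
    (fun p => PySem.Chars.startswith l p)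

def pvMkBC (line : List Char) : List (String × String) :=
  [("question", String.ofList line), ("expected_answer", "Based on document content"),
   ("difficulty", "Medium"), ("type", "comprehension")]

-- termination of the scan: the found newline lies inside `rest`
lemma pvScan_dec (rest : List Char) (h : ¬ PySem.Chars.find rest ['\n'] = -1) :
    (PySem.Chars.slice rest (some (PySem.Chars.find rest ['\n'] + 1)) none).length < rest.length := by
  have h0 : 0 ≤ PySem.Chars.find rest ['\n'] := by
    have := PySem.Chars.neg_one_le_find rest ['\n']
    omega
  obtain ⟨hp, -⟩ := PySem.Chars.find_spec h0
  have hlt : (PySem.Chars.find rest ['\n']).toNat < rest.length := by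
    by_contra hge
    rw [List.drop_eq_nil_of_le (by omega)] at hp
    simp at hp
  rw [PySem.Chars.slice_eq_listSlice, PySem.List.slice_from rest (by omega)]
  simp only [List.length_drop]
  omega

-- the while loop of B: out is the accumulated list, rest the unscanned suffix
def pvScanB (out : List (List (String × String))) (rest : List Char) :
    List (List (String × String)) :=
  let j := PySem.Chars.find rest ['\n']
  let line := PySem.Chars.strip (if j = -1 then rest else PySem.Chars.slice rest none (some j))
  let out2 := if pvMatchC line then out ++ [pvMkBC line] else out
  if h : j = -1 then out2
  else pvScanB out2 (PySem.Chars.slice rest (some (j + 1)) none)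
termination_by rest.length
decreasing_by exact pvScan_dec rest h

def parse_questions_manually_py_alt (response_text : String) (num_questions : Int) :
    List (List (String × String)) :=
  PySem.List.slice (pvScanB [] response_text.toList) none (some num_questions)

-- ===== PRECONDITION & SPEC =====
def Spec_parse_questions_manually_py (response_text : String) (num_questions : Int) (out : List (List (String × String))) : Prop := out = parse_questions_manually_py_alt response_text num_questions
instance (response_text : String) (num_questions : Int) (out : List (List (String × String))) : Decidable (Spec_parse_questions_manually_py response_text num_questions out) := by unfold Spec_parse_questions_manually_py; infer_instance

-- ===== CLAIM (what is proved, stated in full; the proofs are below) =====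
def Claim_equal_parse_questions_manually_py : Prop := ∀ (response_text : String) (num_questions : Int), Dom_parse_questions_manually_py response_text num_questions → Spec_parse_questions_manually_py response_text num_questions (parse_questions_manually_py response_text num_questions)

-- ===== LEMMAS AND PROOFS =====
def pvFlush (st : List (List (String × String)) × PySem.Dict String String) : List (List (String × String)) :=
  if st.2.items ≠ [] then st.1 ++ [st.2.items] else st.1

def pvMatch (l : String) : Bool :=
  ["1.", "2.", "3.", "Question:", "Q:"].any (fun p => PySem.Str.startswith l p)

def pvMkB (line : String) : List (String × String) :=
  [("question", line), ("expected_answer", "Based on document content"),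
   ("difficulty", "Medium"), ("type", "comprehension")]

lemma pvInsert_empty (l : String) :
    (PySem.Dict.insert (PySem.Dict.insert (PySem.Dict.insert (PySem.Dict.insert (PySem.Dict.empty : PySem.Dict String String) "question" l)
      "expected_answer" "Based on document content") "difficulty" "Medium") "type" "comprehension").items = pvMkB l := rfl

lemma pvStepA_match (st : List (List (String × String)) × PySem.Dict String String) (x : String)
    (h : pvMatch (PySem.Str.strip x) = true) :
    pvStepA st x = (pvFlush st,
      PySem.Dict.insert (PySem.Dict.insert (PySem.Dict.insert (PySem.Dict.insert PySem.Dict.empty "question" (PySem.Str.strip x))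
        "expected_answer" "Based on document content") "difficulty" "Medium") "type" "comprehension") := by
  unfold pvStepA pvFlush
  rw [if_pos (by simpa [pvMatch] using h)]
  by_cases hc : st.2.items = []
  · have h2 : st.2 = PySem.Dict.empty := by
      cases st2 : st.2 with | mk items => simp_all [PySem.Dict.empty]
    simp [h2]
  · simp [hc]

lemma pvLoop_eq (lines : List String) (st : List (List (String × String)) × PySem.Dict String String) :
    pvFlush (lines.foldl pvStepA st)
      = pvFlush st ++ ((lines.map PySem.Str.strip).filter pvMatch).map pvMkB := by
  induction lines generalizing st with
  | nil => simp
  | cons x xs ih =>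
    simp only [List.foldl_cons, List.map_cons, List.filter_cons]
    by_cases h : pvMatch (PySem.Str.strip x) = true
    · rw [pvStepA_match st x h, ih]
      simp only [h, if_pos, List.map_cons]
      have hm : pvFlush (pvFlush st,
          PySem.Dict.insert (PySem.Dict.insert (PySem.Dict.insert (PySem.Dict.insert PySem.Dict.empty "question" (PySem.Str.strip x))
            "expected_answer" "Based on document content") "difficulty" "Medium") "type" "comprehension")
          = pvFlush st ++ [pvMkB (PySem.Str.strip x)] := by
        unfold pvFlush
        rw [pvInsert_empty]
        simp [pvMkB]
      rw [hm, List.append_assoc]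
      rfl
    · have hstep : pvStepA st x = st := by
        unfold pvStepA
        rw [if_neg (by simpa [pvMatch] using h)]
      rw [hstep, ih]
      simp [h]

-- reference line splitter (newline separator), structural form
def pvSplitNl : List Char → List (List Char)
  | [] => [[]]
  | a :: t => if a = '\n' then [] :: pvSplitNl t else (pvSplitNl t).modifyHead (a :: ·)

lemma pvSplitNl_ne_nil (cs : List Char) : pvSplitNl cs ≠ [] := by
  induction cs with
  | nil => simp [pvSplitNl]
  | cons a t ih =>
    simp only [pvSplitNl]
    split_ifs
    · simp
    · cases h : pvSplitNl t with
      | nil => exact absurd h ih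
      | cons b r => simp

lemma pvSplitOn_go (fuel : Nat) (l cur : List Char) (acc : List (List Char))
    (hf : l.length + 1 ≤ fuel) :
    PySem.Chars.splitOn.go ['\n'] fuel l cur acc
      = acc.reverse ++ (pvSplitNl l).modifyHead (cur.reverse ++ ·) := by
  induction fuel generalizing l cur acc with
  | zero => omega
  | succ f ih =>
    cases l with
    | nil =>
      rw [PySem.Chars.splitOn.go]
      simp [pvSplitNl]
      omega
    | cons c rest =>
      rw [PySem.Chars.splitOn.go]
      by_cases hc : c = '\n'
      · have hp : ['\n'].isPrefixOf (c :: rest) = true := by simp [List.isPrefixOf, hc]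
        simp only [hp, if_pos]
        rw [show (List.drop ['\n'].length (c :: rest)) = rest from rfl]
        rw [ih rest [] (cur.reverse :: acc) (by simp at hf ⊢; omega)]
        simp [pvSplitNl, hc]
        cases pvSplitNl rest <;> simp
      · have hp : ['\n'].isPrefixOf (c :: rest) = false := by
          simp [List.isPrefixOf]; exact fun hh => absurd hh.symm hc
        simp only [hp, Bool.false_eq_true, if_false]
        rw [ih rest (c :: cur) acc (by simp at hf ⊢; omega)]
        simp only [pvSplitNl, hc, if_false]
        cases h : pvSplitNl rest with
        | nil => exact absurd h (pvSplitNl_ne_nil rest)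
        | cons b r => simp

lemma pvSplit_eq (cs : List Char) : PySem.Chars.splitOn cs ['\n'] = pvSplitNl cs := by
  rw [PySem.Chars.splitOn, pvSplitOn_go (cs.length + 1) cs [] [] (by omega)]
  cases h : pvSplitNl cs with
  | nil => exact absurd h (pvSplitNl_ne_nil cs)
  | cons b r => simp

lemma pvFind_go (l : List Char) (k : Nat) :
    PySem.Chars.find.go ['\n'] l k
      = if PySem.Chars.find l ['\n'] = -1 then -1 else PySem.Chars.find l ['\n'] + k := by
  induction l generalizing k with
  | nil => simp [PySem.Chars.find, PySem.Chars.find.go, List.isEmpty]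
  | cons a t ih =>
    rw [PySem.Chars.find.go]
    rw [show PySem.Chars.find (a :: t) ['\n'] = PySem.Chars.find.go ['\n'] (a :: t) 0 from rfl,
        PySem.Chars.find.go]
    by_cases hp : ['\n'].isPrefixOf (a :: t) = true
    · simp [hp]
    · simp only [hp, Bool.false_eq_true, if_false]
      rw [ih (k+1), ih 1]
      have := PySem.Chars.neg_one_le_find t ['\n']
      split_ifs <;> omega

lemma pvFind_cons (a : Char) (t : List Char) :
    PySem.Chars.find (a :: t) ['\n']
      = if a = '\n' then 0
        else if PySem.Chars.find t ['\n'] = -1 then -1 else PySem.Chars.find t ['\n'] + 1 := by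
  rw [show PySem.Chars.find (a :: t) ['\n'] = PySem.Chars.find.go ['\n'] (a :: t) 0 from rfl,
      PySem.Chars.find.go]
  by_cases h : a = '\n'
  · simp [h, List.isPrefixOf]
  · have hp : ['\n'].isPrefixOf (a :: t) = false := by
      simp [List.isPrefixOf]; exact fun hh => absurd hh.symm h
    simp only [hp, Bool.false_eq_true, if_false, h]
    rw [pvFind_go]
    rfl

lemma pvFind_nil : PySem.Chars.find [] ['\n'] = -1 := by decide

lemma pvSplit_of_find_neg (cs : List Char) (h : PySem.Chars.find cs ['\n'] = -1) :
    pvSplitNl cs = [cs] := by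
  induction cs with
  | nil => rfl
  | cons a t ih =>
    rw [pvFind_cons] at h
    have hne : a ≠ '\n' := by intro ha; simp [ha] at h
    have hft : PySem.Chars.find t ['\n'] = -1 := by
      have := PySem.Chars.neg_one_le_find t ['\n']
      by_cases hc : PySem.Chars.find t ['\n'] = -1
      · exact hc
      · simp [hne, hc] at h; omega
    simp [pvSplitNl, hne, ih hft]

lemma pvSplit_of_find_nonneg (cs : List Char) (h : 0 ≤ PySem.Chars.find cs ['\n']) :
    pvSplitNl cs
      = cs.take (PySem.Chars.find cs ['\n']).toNat
          :: pvSplitNl (cs.drop ((PySem.Chars.find cs ['\n']).toNat + 1)) := by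
  induction cs with
  | nil => rw [pvFind_nil] at h; omega
  | cons a t ih =>
    by_cases ha : a = '\n'
    · subst ha
      have hf : PySem.Chars.find ('\n' :: t) ['\n'] = 0 := by rw [pvFind_cons]; simp
      simp [pvSplitNl, hf]
    · have hft : PySem.Chars.find t ['\n'] ≠ -1 := by
        intro hc
        rw [pvFind_cons] at h; simp [ha, hc] at h
      have h0 : 0 ≤ PySem.Chars.find t ['\n'] := by
        have := PySem.Chars.neg_one_le_find t ['\n']; omega
      have hf : PySem.Chars.find (a :: t) ['\n'] = PySem.Chars.find t ['\n'] + 1 := by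
        rw [pvFind_cons]; simp [ha, hft]
      rw [hf]
      have htn : (PySem.Chars.find t ['\n'] + 1).toNat = (PySem.Chars.find t ['\n']).toNat + 1 := by omega
      simp only [pvSplitNl, ha, if_false, htn, List.take_succ_cons, List.drop_succ_cons]
      rw [ih h0]
      rfl

lemma pvScanB_eq_aux (n : Nat) : ∀ (cs : List Char), cs.length ≤ n →
    ∀ (out : List (List (String × String))),
    pvScanB out cs
      = out ++ (((pvSplitNl cs).map PySem.Chars.strip).filter pvMatchC).map pvMkBC := by
  induction n with
  | zero =>
    intro cs hcs out
    have hnil : cs = [] := List.length_eq_zero_iff.mp (by omega)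
    subst hnil
    rw [pvScanB]
    simp only [pvFind_nil, if_pos, dif_pos, pvSplitNl]
    by_cases hm : pvMatchC (PySem.Chars.strip []) = true <;> simp [hm]
  | succ m ih =>
    intro cs hcs out
    rw [pvScanB]
    by_cases hj : PySem.Chars.find cs ['\n'] = -1
    · simp only [hj, if_pos, dif_pos]
      rw [pvSplit_of_find_neg cs hj]
      by_cases hm : pvMatchC (PySem.Chars.strip cs) = true <;> simp [hm]
    · have h0 : 0 ≤ PySem.Chars.find cs ['\n'] := by
        have := PySem.Chars.neg_one_le_find cs ['\n']; omega
      simp only [hj, dif_neg, if_neg, not_false_iff]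
      have hlt := pvScan_dec cs hj
      rw [ih (PySem.Chars.slice cs (some (PySem.Chars.find cs ['\n'] + 1)) none)
            (by omega)]
      rw [pvSplit_of_find_nonneg cs h0]
      rw [show PySem.Chars.slice cs none (some (PySem.Chars.find cs ['\n']))
            = cs.take (PySem.Chars.find cs ['\n']).toNat from by
        rw [PySem.Chars.slice_eq_listSlice, PySem.List.slice_to cs h0]]
      rw [show PySem.Chars.slice cs (some (PySem.Chars.find cs ['\n'] + 1)) none
            = cs.drop ((PySem.Chars.find cs ['\n']).toNat + 1) from by
        rw [PySem.Chars.slice_eq_listSlice, PySem.List.slice_from cs (by omega)]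
        congr 1
        omega]
      by_cases hm : pvMatchC (PySem.Chars.strip (cs.take (PySem.Chars.find cs ['\n']).toNat)) = true <;>
        simp [hm]

lemma pvScanB_eq (cs : List Char) (out : List (List (String × String))) :
    pvScanB out cs
      = out ++ (((pvSplitNl cs).map PySem.Chars.strip).filter pvMatchC).map pvMkBC := by
  exact pvScanB_eq_aux cs.length cs le_rfl out

lemma pvMatch_eq (y : String) : pvMatch y = pvMatchC y.toList := by
  simp [pvMatch, pvMatchC, PySem.Str.startswith_eq]

lemma pvMkB_eq (y : String) : pvMkB y = pvMkBC y.toList := by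
  simp [pvMkB, pvMkBC, String.ofList_toList]

lemma pvBridge (ls : List String) :
    ((ls.map PySem.Str.strip).filter pvMatch).map pvMkB
      = ((((ls.map String.toList).map PySem.Chars.strip).filter pvMatchC).map pvMkBC) := by
  induction ls with
  | nil => rfl
  | cons x xs ih =>
    simp only [List.map_cons, List.filter_cons, pvMatch_eq, PySem.Str.toList_strip]
    split_ifs <;> simp [ih, pvMkB_eq, PySem.Str.toList_strip]

theorem pv_main (response_text : String) (num_questions : Int) :
    parse_questions_manually_py response_text num_questions
      = parse_questions_manually_py_alt response_text num_questions := by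
  unfold parse_questions_manually_py parse_questions_manually_py_alt
  rw [pvScanB_eq]
  have hsplit := PySem.Str.split?_map response_text "\n"
  rw [show ("\n" : String).toList = ['\n'] from rfl] at hsplit
  rw [show PySem.Chars.split? response_text.toList ['\n'] = some (pvSplitNl response_text.toList) from by
    simp [PySem.Chars.split?, pvSplit_eq]] at hsplit
  cases e : PySem.Str.split? response_text "\n" with
  | none => rw [e] at hsplit; simp at hsplit
  | some ls =>
    rw [e] at hsplit
    simp only [Option.map_some, Option.some.injEq] at hsplit
    simp only [Option.getD_some]
    congr 1
    have hfl := pvLoop_eq ls ([], PySem.Dict.empty)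
    simp only [pvFlush] at hfl
    rw [hfl]
    rw [show (PySem.Dict.empty : PySem.Dict String String).items = [] from rfl]
    simp only [ne_eq, not_true_eq_false, if_false, List.nil_append]
    rw [pvBridge, hsplit]

-- ===== VERDICT (by name: the statement is the Claim_ definition above) =====
theorem parse_questions_manually_py_spec : Claim_equal_parse_questions_manually_py := by
  intro rt n _
  unfold Spec_parse_questions_manually_py
  exact pv_main rt n
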